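-- pv_equiv track=rewrite | github.com/nedimazar/python-for-text-analysis | Assignments/ted_translation_analysis.py | map_nlang_to_talks
-- ===== SOURCE A (Python) =====
-- def map_nlang_to_talks(talks_to_lang):
--     nlang_to_talks = dict()
--     for talk, langs in talks_to_lang.items():
--         nlangs = len(langs)
--         if nlangs not in nlang_to_talks:
--             nlang_to_talks[nlangs] = []
--         nlang_to_talks[nlangs].append(talk)
--     return nlang_to_talks
-- ===== SOURCE B (Python) =====
-- def map_nlang_to_talks(talks_to_lang):
--     # Two-pass grouping: collect the distinct language counts in first-appearance
--     # order, then build each bucket by a single filter per key.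
--     order = list(dict.fromkeys(len(langs) for langs in talks_to_lang.values()))
--     return {n: [talk for talk, langs in talks_to_lang.items() if len(langs) == n]
--             for n in order}
-- ===== Notes on version B (the rewrite author's own statement) =====
-- stated objective: idiomatic
-- what changed: Replaces the incremental bucket dict (membership test + append per element) by a two-pass comprehension: dict.fromkeys gives the distinct language counts in first-appearance order, then one filter per count builds each bucket; Pre_ only requires the association list to have distinct talk keys, since a list with duplicate keys does not represent the Python dict argument.
import Mathlib
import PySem

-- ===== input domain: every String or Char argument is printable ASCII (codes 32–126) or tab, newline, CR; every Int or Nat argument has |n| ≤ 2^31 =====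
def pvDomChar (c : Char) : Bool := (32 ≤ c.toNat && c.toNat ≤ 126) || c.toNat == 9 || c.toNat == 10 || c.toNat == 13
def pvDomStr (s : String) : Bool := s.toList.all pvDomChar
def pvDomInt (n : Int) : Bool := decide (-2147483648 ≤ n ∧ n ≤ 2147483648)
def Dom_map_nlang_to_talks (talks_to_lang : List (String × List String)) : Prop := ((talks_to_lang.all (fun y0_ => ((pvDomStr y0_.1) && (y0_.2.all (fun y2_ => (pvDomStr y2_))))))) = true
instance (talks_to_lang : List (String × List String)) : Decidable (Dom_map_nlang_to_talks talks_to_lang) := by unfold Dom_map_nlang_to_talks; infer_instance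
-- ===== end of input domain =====

-- B replaces A's incremental bucket dict by a two-pass grouping (ordered-dedup of the
-- language counts, then one filter per count); same return value, idiomatic objective.


-- ===== PORT A =====
-- for talk, langs in d.items(): if nlangs not in nlang_to_talks: …[nlangs] = []; …[nlangs].append(talk)
def map_nlang_to_talks (talks_to_lang : List (String × List String)) : List (Int × List String) :=
  (talks_to_lang.foldl
    (fun (d : PySem.Dict Int (List String)) p =>
      let nlangs : Int := p.2.length
      let d := if d.contains nlangs = false then d.insert nlangs [] else d
      d.modify nlangs [] (fun xs => xs ++ [p.1]))
    PySem.Dict.empty).items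

-- ===== PORT B =====
-- order = list(dict.fromkeys(len(langs) for langs in d.values())); {n: [talk … if len(langs)==n] for n in order}
def map_nlang_to_talks_alt (talks_to_lang : List (String × List String)) : List (Int × List String) :=
  let order := PySem.List.dedup (talks_to_lang.map (fun p => (p.2.length : Int)))
  order.map (fun n =>
    (n, (talks_to_lang.filter (fun p => ((p.2.length : Int) == n))).map Prod.fst))

-- ===== PRECONDITION & SPEC =====
-- Pre_ requires distinct talk keys: the argument is a Python dict, and an association
-- list with duplicate keys does not represent one (Python collapses duplicates).
def Pre_map_nlang_to_talks (talks_to_lang : List (String × List String)) : Prop :=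
  (talks_to_lang.map Prod.fst).Nodup
instance (talks_to_lang : List (String × List String)) : Decidable (Pre_map_nlang_to_talks talks_to_lang) := by unfold Pre_map_nlang_to_talks; infer_instance

def pvWitness_map_nlang_to_talks : (List (String × List String)) :=
  [("a", ["en", "nl"]), ("b", []), ("c", ["en", "fr"])]

def Spec_map_nlang_to_talks (talks_to_lang : List (String × List String)) (out : List (Int × List String)) : Prop := out = map_nlang_to_talks_alt talks_to_lang
instance (talks_to_lang : List (String × List String)) (out : List (Int × List String)) : Decidable (Spec_map_nlang_to_talks talks_to_lang out) := by unfold Spec_map_nlang_to_talks; infer_instance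

-- ===== CLAIM (what is proved, stated in full; the proofs are below) =====
def Claim_equal_map_nlang_to_talks : Prop := ∀ (talks_to_lang : List (String × List String)), Dom_map_nlang_to_talks talks_to_lang → Pre_map_nlang_to_talks talks_to_lang → Spec_map_nlang_to_talks talks_to_lang (map_nlang_to_talks talks_to_lang)

-- ===== LEMMAS AND PROOFS =====

-- A's per-element step ("insert [] if absent, then append") is exactly Dict.modify.
theorem step_eq_modify (d : PySem.Dict Int (List String)) (n : Int) (t : String) :
    ((if d.contains n = false then d.insert n [] else d).modify n [] (fun xs => xs ++ [t]))
      = d.modify n [] (fun xs => xs ++ [t]) := by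
  by_cases h : d.contains n = false
  · simp only [h, if_pos]
    simp [PySem.Dict.modify, PySem.Dict.insert_insert_self, PySem.Dict.getD_of_not_contains, h]
  · simp [h]

-- A's fold is the pure modify-loop over (count, talk) pairs.
theorem foldA_eq_modify_loop (l : List (String × List String)) :
    (l.foldl
      (fun (d : PySem.Dict Int (List String)) p =>
        let nlangs : Int := p.2.length
        let d := if d.contains nlangs = false then d.insert nlangs [] else d
        d.modify nlangs [] (fun xs => xs ++ [p.1]))
      PySem.Dict.empty)
    = (l.map (fun p => ((p.2.length : Int), p.1))).foldl
        (fun d q => d.modify q.1 [] (fun xs => xs ++ [q.2])) PySem.Dict.empty := by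
  rw [List.foldl_map]
  have hf : (fun (d : PySem.Dict Int (List String)) (p : String × List String) =>
        let nlangs : Int := p.2.length
        let d := if d.contains nlangs = false then d.insert nlangs [] else d
        d.modify nlangs [] (fun xs => xs ++ [p.1]))
      = fun d p => d.modify (p.2.length : Int) [] (fun xs => xs ++ [p.1]) := by
    funext d p; exact step_eq_modify d _ _
  rw [hf]

-- ===== VERDICT (by name: the statement is the Claim_ definition above) =====
theorem map_nlang_to_talks_spec : Claim_equal_map_nlang_to_talks := by
  intro l _ _
  unfold Spec_map_nlang_to_talks map_nlang_to_talks map_nlang_to_talks_alt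
  rw [foldA_eq_modify_loop]
  set L := l.map (fun p => ((p.2.length : Int), p.1)) with hL
  have hnd : ((L.foldl (fun d q => d.modify q.1 [] (fun xs => xs ++ [q.2])) PySem.Dict.empty)).keys.Nodup :=
    PySem.Dict.nodup_keys_foldl_modify_key L Prod.fst [] (fun _ q xs => xs ++ [q.2]) _
      (by simp [PySem.Dict.keys_empty])
  rw [PySem.Dict.items_eq_map_keys _ hnd ([] : List String)]
  rw [PySem.Dict.keys_foldl_modify_key L Prod.fst [] (fun _ q xs => xs ++ [q.2])]
  simp only [PySem.Dict.keys_empty, PySem.Set.update_nil_left, PySem.List.dedup_eq_ofList]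
  have hm : L.map Prod.fst = l.map (fun p => ((p.2.length : Int))) := by
    simp [hL, List.map_map, Function.comp]
  rw [hm]
  apply List.map_congr_left
  intro n hn
  rw [PySem.Dict.getD_foldl_modify_append L PySem.Dict.empty n]
  simp [hL, PySem.Dict.getD_empty, List.filter_map, Function.comp_def]
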